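-- pv_equiv track=rewrite | github.com/timechess/EvoScientist | EvoScientist/cli/widgets/thread_selector.py | _group_by_ancestor
-- ===== SOURCE A (Python) =====
-- def _common_prefix_depth(p1: str, p2: str) -> int:
--     """Return the number of leading path components shared by *p1* and *p2*."""
--     depth = 0
--     for a, b in zip(p1.split("/"), p2.split("/"), strict=False):
--         if a == b:
--             depth += 1
--         else:
--             break
--     return depth
--
-- def _group_by_ancestor(norm_paths: list[str]) -> dict[str, list[str]]:
--     """Group normalized paths by their deepest common ancestor.
--
--     Two paths are placed in the same group when they share a common prefix
--     of at least 2 components (e.g. ``~/Projects``).  Paths with no such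
--     shared prefix become standalone single-item groups keyed by their own
--     full path.
--
--     The returned dict is ordered by first appearance in *norm_paths*.
--
--     Complexity: O(n log n) — paths are sorted lexicographically so the
--     maximum common prefix depth for each path is found by comparing only
--     its immediate neighbours in sorted order (not all pairs).
--     """
--     sorted_paths = sorted(norm_paths)
--     n = len(sorted_paths)
--
--     # Single pass over sorted list: max common prefix is always with a neighbour.
--     sorted_best: dict[str, int] = {}
--     for i, p in enumerate(sorted_paths):
--         best = 1  # at minimum depth 1 (~)
--         if i > 0:
--             best = max(best, _common_prefix_depth(p, sorted_paths[i - 1]))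
--         if i < n - 1:
--             best = max(best, _common_prefix_depth(p, sorted_paths[i + 1]))
--         sorted_best[p] = best
--
--     path_to_ancestor: dict[str, str] = {
--         p: ("/".join(p.split("/")[:best]) if best >= 2 else p)
--         for p, best in sorted_best.items()
--     }
--
--     groups: dict[str, list[str]] = {}
--     for p in norm_paths:
--         anc = path_to_ancestor[p]
--         if anc not in groups:
--             groups[anc] = []
--         groups[anc].append(p)
--     return groups
-- ===== SOURCE B (Python) =====
-- def _cpd(c1, c2):
--     """Common prefix length of two component lists (recursive)."""
--     if c1 and c2 and c1[0] == c2[0]: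
--         return 1 + _cpd(c1[1:], c2[1:])
--     return 0
--
--
-- def _group_by_ancestor(norm_paths):
--     # For each distinct path, find its lexicographic predecessor / successor
--     # (and whether it is duplicated) by a direct scan -- no sorting needed:
--     # the deepest neighbour prefix in sorted order is always with one of these.
--     anc = {}
--     for i, p in enumerate(norm_paths):
--         if p in anc:
--             continue
--         comps = p.split("/")
--         pred = None
--         succ = None
--         dup = False
--         for j, q in enumerate(norm_paths):
--             if j == i:
--                 continue
--             if q == p:
--                 dup = True
--             elif q < p:
--                 if pred is None or pred < q:
--                     pred = q
--             else:
--                 if succ is None or q < succ: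
--                     succ = q
--         best = len(comps) if dup else 1
--         if pred is not None:
--             best = max(best, _cpd(comps, pred.split("/")))
--         if succ is not None:
--             best = max(best, _cpd(comps, succ.split("/")))
--         anc[p] = "/".join(comps[:best]) if best >= 2 else p
--     groups = {}
--     for p in norm_paths:
--         a = anc[p]
--         if a not in groups:
--             groups[a] = []
--         groups[a].append(p)
--     return groups
-- ===== Notes on version B (the rewrite author's own statement) =====
-- stated objective: alternative
-- what changed: Drops the sort entirely: for each distinct path a single scan over the list finds its lexicographic predecessor, successor and a duplicate flag, from which the same deepest-neighbour prefix depth (and hence the same ancestor and groups) is computed directly.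
import Mathlib
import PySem

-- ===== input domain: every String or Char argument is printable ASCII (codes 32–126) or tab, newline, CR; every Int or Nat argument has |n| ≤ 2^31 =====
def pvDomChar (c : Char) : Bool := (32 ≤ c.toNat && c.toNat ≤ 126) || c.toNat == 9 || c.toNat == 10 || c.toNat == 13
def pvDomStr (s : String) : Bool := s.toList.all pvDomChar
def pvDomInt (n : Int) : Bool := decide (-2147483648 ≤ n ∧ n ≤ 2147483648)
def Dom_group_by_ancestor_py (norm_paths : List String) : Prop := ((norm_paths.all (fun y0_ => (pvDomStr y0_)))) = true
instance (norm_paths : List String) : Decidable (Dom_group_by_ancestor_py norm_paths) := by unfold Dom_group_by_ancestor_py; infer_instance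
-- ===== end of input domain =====

-- B replaces A's sort + neighbour single pass by a direct per-path scan that finds the
-- lexicographic predecessor/successor (and a duplicate flag) of each distinct path;
-- objective: alternative (no sort), identical return value.

-- p.split("/")  (sep "/" is nonempty, so split? is always some; the default is never used)
def splitSlash (s : String) : List String := (PySem.Str.split? s "/").getD []

-- ===== PORT A =====
-- the 'for a, b in zip(...): if a == b: depth += 1 else: break' loop of _common_prefix_depth
def cpdGo (depth : Int) : List (String × String) → Int
  | [] => depth
  | (a, b) :: rest => if a == b then cpdGo (depth + 1) rest else depth

-- _common_prefix_depth
def common_prefix_depth (p1 p2 : String) : Int :=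
  cpdGo 0 (List.zip (splitSlash p1) (splitSlash p2))

-- the 'for i, p in enumerate(sorted_paths)' loop building sorted_best
def sortedBestA (sorted_paths : List String) : PySem.Dict String Int :=
  let n : Int := sorted_paths.length
  (PySem.List.enumerate sorted_paths 0).foldl (fun d ip =>
    let i := ip.1
    let p := ip.2
    let best : Int := 1
    let best := if 0 < i then max best (common_prefix_depth p (PySem.List.pyGetD sorted_paths (i - 1) "")) else best
    let best := if i < n - 1 then max best (common_prefix_depth p (PySem.List.pyGetD sorted_paths (i + 1) "")) else best
    d.insert p best) PySem.Dict.empty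

-- the dict comprehension building path_to_ancestor
def pathToAncestorA (sorted_best : PySem.Dict String Int) : PySem.Dict String String :=
  sorted_best.items.foldl (fun d pb =>
    d.insert pb.1 (if 2 ≤ pb.2 then PySem.Str.join "/" (PySem.List.slice (splitSlash pb.1) none (some pb.2)) else pb.1))
    PySem.Dict.empty

-- the final grouping loop
def groupsA (path_to_ancestor : PySem.Dict String String) (norm_paths : List String) :
    PySem.Dict String (List String) :=
  norm_paths.foldl (fun g p =>
    let anc := (path_to_ancestor.get? p).getD p   -- key always present; default never used
    let g := if g.contains anc then g else g.insert anc []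
    g.modify anc [] (fun l => l ++ [p])) PySem.Dict.empty

def group_by_ancestor_py (norm_paths : List String) : List (String × List String) :=
  (groupsA (pathToAncestorA (sortedBestA (PySem.List.sorted norm_paths (fun x => x) false))) norm_paths).items

-- ===== PORT B =====
-- _cpd of Source B: recursion on the two component lists
def cpdB : List String → List String → Int
  | a :: t1, b :: t2 => if a == b then 1 + cpdB t1 t2 else 0
  | _, _ => 0

-- 'if pred is None or pred < q: pred = q'
def predUpd (o : Option String) (q : String) : Option String :=
  match o with
  | none => some q
  | some pr => if pr < q then some q else some pr

-- 'if succ is None or q < succ: succ = q'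
def succUpd (o : Option String) (q : String) : Option String :=
  match o with
  | none => some q
  | some sc => if q < sc then some q else some sc

-- one step of Source B's inner scan over enumerate(norm_paths): state (pred, succ, dup)
def scanStep (i : Int) (p : String) (st : Option String × Option String × Bool)
    (jq : Int × String) : Option String × Option String × Bool :=
  if jq.1 == i then st
  else if jq.2 == p then (st.1, st.2.1, true)
  else if jq.2 < p then (predUpd st.1 jq.2, st.2.1, st.2.2)
  else (st.1, succUpd st.2.1 jq.2, st.2.2)

-- the 'for i, p in enumerate(norm_paths)' loop building anc
def ancB (norm_paths : List String) : PySem.Dict String String :=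
  (PySem.List.enumerate norm_paths 0).foldl (fun d ip =>
    let i := ip.1
    let p := ip.2
    if d.contains p then d else
    let comps := splitSlash p
    let scan := (PySem.List.enumerate norm_paths 0).foldl (scanStep i p) (none, none, false)
    let best : Int := if scan.2.2 then (comps.length : Int) else 1
    let best := match scan.1 with
      | none => best
      | some pr => max best (cpdB comps (splitSlash pr))
    let best := match scan.2.1 with
      | none => best
      | some sc => max best (cpdB comps (splitSlash sc))
    d.insert p (if 2 ≤ best then PySem.Str.join "/" (PySem.List.slice comps none (some best)) else p))
    PySem.Dict.empty

-- the final grouping loop of Source B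
def groupsB (anc : PySem.Dict String String) (norm_paths : List String) :
    PySem.Dict String (List String) :=
  norm_paths.foldl (fun g p =>
    let a := (anc.get? p).getD p   -- key always present; default never used
    let g := if g.contains a then g else g.insert a []
    g.modify a [] (fun l => l ++ [p])) PySem.Dict.empty

def group_by_ancestor_py_alt (norm_paths : List String) : List (String × List String) :=
  (groupsB (ancB norm_paths) norm_paths).items

-- ===== PRECONDITION & SPEC =====
def Spec_group_by_ancestor_py (norm_paths : List String) (out : List (String × List String)) : Prop := out = group_by_ancestor_py_alt norm_paths
instance (norm_paths : List String) (out : List (String × List String)) : Decidable (Spec_group_by_ancestor_py norm_paths out) := by unfold Spec_group_by_ancestor_py; infer_instance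

-- ===== CLAIM (what is proved, stated in full; the proofs are below) =====
def Claim_equal_group_by_ancestor_py : Prop := ∀ (norm_paths : List String), Dom_group_by_ancestor_py norm_paths → Spec_group_by_ancestor_py norm_paths (group_by_ancestor_py norm_paths)

-- ===== LEMMAS AND PROOFS =====

-- reference values both ports are reduced to
def PmaxF (p : String) (l : List String) : Option String :=
  (l.filter (fun q => decide (q < p))).max?

def SminF (p : String) (l : List String) : Option String :=
  (l.filter (fun q => decide (p < q))).min?

def BestF (l : List String) (p : String) : Int :=
  let comps := splitSlash p
  let b0 : Int := if 2 ≤ l.count p then (comps.length : Int) else 1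
  let b1 : Int := match PmaxF p l with
    | none => b0
    | some pr => max b0 (cpdB comps (splitSlash pr))
  match SminF p l with
  | none => b1
  | some sc => max b1 (cpdB comps (splitSlash sc))

def AncF (l : List String) (p : String) : String :=
  if 2 ≤ BestF l p then PySem.Str.join "/" (PySem.List.slice (splitSlash p) none (some (BestF l p))) else p

def valA (s : List String) (k : Nat) : Int :=
  let p := s.getD k ""
  let b : Int := 1
  let b := if 0 < k then max b (cpdB (splitSlash p) (splitSlash (s.getD (k - 1) ""))) else b
  if k + 1 < s.length then max b (cpdB (splitSlash p) (splitSlash (s.getD (k + 1) ""))) else b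

theorem splitOn_go_len (sep : List Char) (fuel : Nat) :
    ∀ (l cur : List Char) (acc : List (List Char)),
      acc.length + 1 ≤ (PySem.Chars.splitOn.go sep fuel l cur acc).length := by
  induction fuel with
  | zero => intro l cur acc; simp [PySem.Chars.splitOn.go]
  | succ fuel ih =>
    intro l cur acc
    cases l with
    | nil => simp [PySem.Chars.splitOn.go]
    | cons c rest =>
      rw [PySem.Chars.splitOn.go]
      split
      · have := ih (List.drop sep.length (c :: rest)) [] (cur.reverse :: acc)
        simp at this; omega
      · exact ih _ _ acc

theorem splitSlash_len (s : String) : 1 ≤ (splitSlash s).length := by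
  rw [splitSlash]
  have h := splitOn_go_len ['/'] (s.toList.length + 1) s.toList [] []
  simp [PySem.Str.split?, PySem.Chars.split?, PySem.Chars.splitOn]
  simpa using h

theorem cpdB_le_len (c1 c2 : List String) : cpdB c1 c2 ≤ (c1.length : Int) := by
  induction c1 generalizing c2 with
  | nil => simp [cpdB]
  | cons a t1 ih =>
    cases c2 with
    | nil => simp [cpdB]; positivity
    | cons b t2 =>
      simp only [cpdB]; split
      · have := ih t2; simp [List.length_cons]; push_cast; omega
      · simp; positivity

theorem cpdB_self (c : List String) : cpdB c c = (c.length : Int) := by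
  induction c with
  | nil => simp [cpdB]
  | cons a t ih => simp [cpdB, ih]; push_cast; ring

theorem cpdGo_zip (c1 c2 : List String) : ∀ acc : Int, cpdGo acc (List.zip c1 c2) = acc + cpdB c1 c2 := by
  induction c1 generalizing c2 with
  | nil => intro acc; simp [cpdB, cpdGo]
  | cons a t1 ih =>
    intro acc
    cases c2 with
    | nil => simp [cpdB, cpdGo]
    | cons b t2 =>
      simp only [List.zip_cons_cons, cpdGo, cpdB]
      split
      · rw [ih]; ring
      · ring

theorem cpd_eq (p q : String) : common_prefix_depth p q = cpdB (splitSlash p) (splitSlash q) := by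
  rw [common_prefix_depth, cpdGo_zip, zero_add]

theorem predUpd_some (a q : String) : predUpd (some a) q = some (max a q) := by
  simp only [predUpd]
  rcases lt_or_ge a q with h | h
  · rw [if_pos h, max_eq_right h.le]
  · rw [if_neg (not_lt.mpr h), max_eq_left h]

theorem succUpd_some (a q : String) : succUpd (some a) q = some (min a q) := by
  simp only [succUpd]
  rcases lt_or_ge q a with h | h
  · rw [if_pos h, min_eq_right h.le]
  · rw [if_neg (not_lt.mpr h), min_eq_left h]

theorem foldl_predUpd_some (m : List String) : ∀ a : String,
    m.foldl predUpd (some a) = some (m.foldl max a) := by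
  induction m with
  | nil => intro a; simp
  | cons q t ih => intro a; simp [List.foldl_cons, predUpd_some, ih]

theorem foldl_predUpd_none (m : List String) : m.foldl predUpd none = m.max? := by
  cases m with
  | nil => simp [List.max?]
  | cons a t => simp [List.max?, List.foldl_cons, predUpd, foldl_predUpd_some]

theorem foldl_succUpd_some (m : List String) : ∀ a : String,
    m.foldl succUpd (some a) = some (m.foldl min a) := by
  induction m with
  | nil => intro a; simp
  | cons q t ih => intro a; simp [List.foldl_cons, succUpd_some, ih]

theorem foldl_succUpd_none (m : List String) : m.foldl succUpd none = m.min? := by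
  cases m with
  | nil => simp [List.min?]
  | cons a t => simp [List.min?, List.foldl_cons, succUpd, foldl_succUpd_some]

theorem scan_foldl (i : Int) (p : String) (L : List (Int × String))
    (hL : ∀ jq ∈ L, jq.1 = i → jq.2 = p) (st : Option String × Option String × Bool) :
    L.foldl (scanStep i p) st =
      ( ((L.map (·.2)).filter (fun q => decide (q < p))).foldl predUpd st.1,
        ((L.map (·.2)).filter (fun q => decide (p < q))).foldl succUpd st.2.1,
        st.2.2 || L.any (fun jq => jq.1 != i && jq.2 == p) ) := by
  induction L generalizing st with
  | nil => simp
  | cons jq rest ih =>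
    have hrest : ∀ x ∈ rest, x.1 = i → x.2 = p := fun x hx => hL x (List.mem_cons_of_mem _ hx)
    obtain ⟨j, q⟩ := jq
    by_cases hj : j = i
    · have hq : q = p := hL (j, q) List.mem_cons_self hj
      subst hq hj
      simp only [List.foldl_cons, List.map_cons, List.any_cons, scanStep]
      rw [if_pos (by simp)]
      rw [ih hrest st]
      simp [lt_irrefl]
    · by_cases hq : q = p
      · subst hq
        simp only [List.foldl_cons, List.map_cons, List.any_cons, scanStep]
        rw [if_neg (by simpa using hj)]
        rw [if_pos (by simp)]
        rw [ih hrest]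
        simp [lt_irrefl, hj]
      · rcases lt_trichotomy q p with hlt | heq | hgt
        · simp only [List.foldl_cons, List.map_cons, List.any_cons, scanStep]
          rw [if_neg (by simpa using hj), if_neg (by simpa using hq), if_pos hlt]
          rw [ih hrest]
          rw [List.filter_cons, List.filter_cons, if_pos (by simpa using hlt),
            if_neg (by simpa using not_lt.mpr hlt.le), List.foldl_cons]
          have hb : (q == p) = false := beq_eq_false_iff_ne.mpr hq
          simp [hb]
        · exact absurd heq hq
        · simp only [List.foldl_cons, List.map_cons, List.any_cons, scanStep]
          rw [if_neg (by simpa using hj), if_neg (by simpa using hq), if_neg (not_lt.mpr hgt.le)]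
          rw [ih hrest]
          rw [List.filter_cons, List.filter_cons, if_neg (by simpa using not_lt.mpr hgt.le),
            if_pos (by simpa using hgt), List.foldl_cons]
          have hb : (q == p) = false := beq_eq_false_iff_ne.mpr hq
          simp [hb]

theorem two_le_count_iff (l : List String) (p : String) (k : Nat) (hk : k < l.length) (hp : l[k] = p) :
    2 ≤ l.count p ↔ ∃ k', ∃ (h : k' < l.length), k' ≠ k ∧ l[k'] = p := by
  rw [← List.duplicate_iff_two_le_count, List.duplicate_iff_exists_distinct_get]
  constructor
  · rintro ⟨n, m, hnm, hn, hm⟩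
    by_cases h : (n : Nat) = k
    · exact ⟨m, m.isLt, by omega, by simpa using hm.symm⟩
    · exact ⟨n, n.isLt, h, by simpa using hn.symm⟩
  · rintro ⟨k', hk', hne, hpk⟩
    rcases Nat.lt_or_ge k' k with h | h
    · exact ⟨⟨k', by omega⟩, ⟨k, hk⟩, by simpa using h, by simpa using hpk.symm, by simp [hp]⟩
    · have : k < k' := by omega
      exact ⟨⟨k, hk⟩, ⟨k', hk'⟩, by simpa using this, by simp [hp], by simpa using hpk.symm⟩

theorem scan_enumerate (l : List String) (p : String) (k : Nat) (hk : k < l.length) (hp : l[k] = p) :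
    (PySem.List.enumerate l 0).foldl (scanStep (k : Int) p) (none, none, false) =
      (PmaxF p l, SminF p l, decide (2 ≤ l.count p)) := by
  have hL : ∀ jq ∈ PySem.List.enumerate l 0, jq.1 = (k : Int) → jq.2 = p := by
    intro jq hjq h1
    rw [PySem.List.mem_enumerate_iff] at hjq
    obtain ⟨k', hk', rfl⟩ := hjq
    simp only [zero_add] at h1 ⊢
    have : k' = k := by exact_mod_cast h1
    subst this; exact hp
  rw [scan_foldl _ _ _ hL]
  rw [PySem.List.map_snd_enumerate]
  rw [foldl_predUpd_none, foldl_succUpd_none]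
  refine Prod.ext rfl (Prod.ext rfl ?_)
  simp only [Bool.false_or]
  have hiff := two_le_count_iff l p k hk hp
  rcases h : (PySem.List.enumerate l 0).any (fun jq => jq.1 != (k:Int) && jq.2 == p) with _|_
  · simp only [List.any_eq_false] at h
    symm; simp only [decide_eq_false_iff_not]
    rw [hiff]
    rintro ⟨k', hk', hne, hpk⟩
    have hmem : ((0:Int) + k', l[k']) ∈ PySem.List.enumerate l 0 := by
      rw [PySem.List.mem_enumerate_iff]; exact ⟨k', hk', rfl⟩
    have := h _ hmem
    simp only [zero_add, Bool.and_eq_true, bne_iff_ne, beq_iff_eq, not_and] at this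
    exact this (by exact_mod_cast hne) hpk
  · simp only [List.any_eq_true] at h
    obtain ⟨jq, hjq, hcond⟩ := h
    rw [PySem.List.mem_enumerate_iff] at hjq
    obtain ⟨k', hk', rfl⟩ := hjq
    simp only [zero_add, Bool.and_eq_true, bne_iff_ne, beq_iff_eq] at hcond
    symm; simp only [decide_eq_true_eq]
    rw [hiff]
    exact ⟨k', hk', by exact_mod_cast hcond.1, hcond.2⟩

theorem get?_foldl_insert_key (xs : List String) {ν : Type} (h : String → ν) :
    ∀ (d0 : PySem.Dict String ν) (p : String),
    (xs.foldl (fun d x => d.insert x (h x)) d0).get? p =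
      if p ∈ xs then some (h p) else d0.get? p := by
  induction xs with
  | nil => intro d0 p; simp
  | cons x t ih =>
    intro d0 p
    rw [List.foldl_cons, ih]
    by_cases hpt : p ∈ t
    · simp [hpt]
    · by_cases hpx : p = x
      · subst hpx
        simp [hpt, PySem.Dict.get?_insert_self]
      · simp [hpt, hpx, PySem.Dict.get?_insert_of_ne _ _ hpx]

theorem get?_foldl_insert_absent (xs : List String) {ν : Type} (h : String → ν) :
    ∀ (d0 : PySem.Dict String ν) (p : String),
    (xs.foldl (fun d x => if d.contains x then d else d.insert x (h x)) d0).get? p =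
      match d0.get? p with
      | some v => some v
      | none => if p ∈ xs then some (h p) else none := by
  induction xs with
  | nil => intro d0 p; simp; cases d0.get? p <;> simp
  | cons x t ih =>
    intro d0 p
    rw [List.foldl_cons]
    by_cases hc : d0.contains x = true
    · rw [if_pos hc, ih]
      by_cases hpx : p = x
      · subst hpx
        have : ∃ v, d0.get? p = some v := by
          have := PySem.Dict.contains_eq_isSome_get? d0 p
          rw [hc] at this
          exact Option.isSome_iff_exists.mp this.symm
        obtain ⟨v, hv⟩ := this
        simp [hv]
      · cases hd : d0.get? p <;> simp [hpx]
    · rw [if_neg hc, ih]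
      by_cases hpx : p = x
      · subst hpx
        have hnone : d0.get? p = none := by
          have := PySem.Dict.contains_eq_isSome_get? d0 p
          cases hd : d0.get? p
          · rfl
          · rw [hd] at this; simp at this; rw [this] at hc; simp at hc
        rw [PySem.Dict.get?_insert_self]
        simp [hnone]
      · rw [PySem.Dict.get?_insert_of_ne _ _ hpx]
        cases hd : d0.get? p <;> simp [hpx]

theorem below_le (s : List String) (hpw : s.Pairwise (· ≤ ·)) (k : Nat) (hk : k < s.length) :
    ∀ q ∈ s, q < s[k] → 0 < k ∧ q ≤ s.getD (k - 1) "" := by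
  rw [List.pairwise_iff_getElem] at hpw
  intro q hq hqp
  obtain ⟨j, hj, hjq⟩ := List.mem_iff_getElem.mp hq
  rcases Nat.lt_trichotomy j k with hjk | hjk | hjk
  · refine ⟨by omega, ?_⟩
    rw [List.getD_eq_getElem _ _ (by omega : k - 1 < s.length)]
    rcases Nat.lt_or_ge j (k - 1) with h | h
    · exact hjq ▸ hpw j (k - 1) hj (by omega) h
    · have hj' : j = k - 1 := by omega
      subst hj'; exact hjq ▸ le_refl _
  · subst hjk; rw [hjq] at hqp; exact absurd hqp (lt_irrefl _)
  · have h := hpw k j hk hj hjk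
    rw [hjq] at h
    exact absurd hqp (not_lt.mpr h)

theorem above_ge (s : List String) (hpw : s.Pairwise (· ≤ ·)) (k : Nat) (hk : k < s.length) :
    ∀ q ∈ s, s[k] < q → k + 1 < s.length ∧ s.getD (k + 1) "" ≤ q := by
  rw [List.pairwise_iff_getElem] at hpw
  intro q hq hqp
  obtain ⟨j, hj, hjq⟩ := List.mem_iff_getElem.mp hq
  rcases Nat.lt_trichotomy j k with hjk | hjk | hjk
  · have h := hpw j k hj hk hjk
    rw [hjq] at h
    exact absurd hqp (not_lt.mpr h)
  · subst hjk; rw [hjq] at hqp; exact absurd hqp (lt_irrefl _)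
  · refine ⟨by omega, ?_⟩
    rw [List.getD_eq_getElem _ _ (by omega : k + 1 < s.length)]
    rcases Nat.lt_or_ge (k + 1) j with h | h
    · exact hjq ▸ hpw (k + 1) j (by omega) hj h
    · have hj' : j = k + 1 := by omega
      subst hj'; exact hjq ▸ le_refl _

theorem valA_eq_BestF (l : List String) (k : Nat)
    (hk : k < (PySem.List.sorted l (fun x => x) false).length) :
    valA (PySem.List.sorted l (fun x => x) false) k =
      BestF l ((PySem.List.sorted l (fun x => x) false).getD k "") := by
  set s := PySem.List.sorted l (fun x => x) false with hs
  have hsp : s.Perm l := PySem.List.sorted_perm l _ false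
  have hgd : s.getD k "" = s[k] := List.getD_eq_getElem _ _ hk
  set p := s[k] with hp
  have hmem : ∀ q, q ∈ l ↔ q ∈ s := fun q => hsp.mem_iff.symm
  have hcnt : l.count p = s.count p := (hsp.count_eq p).symm
  have hpair : s.Pairwise (· ≤ ·) := PySem.List.sorted_pairwise l (fun x => x)
  have L1 := below_le s hpair k hk
  have L2 := above_ge s hpair k hk
  -- characterization of PmaxF
  have hPmax_some : ∀ pr, PmaxF p l = some pr → pr ∈ l ∧ pr < p ∧ ∀ b ∈ l, b < p → b ≤ pr := by
    intro pr hpr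
    rw [PmaxF, List.max?_eq_some_iff] at hpr
    obtain ⟨hm, hb⟩ := hpr
    rw [List.mem_filter] at hm
    refine ⟨hm.1, by simpa using hm.2, ?_⟩
    intro b hbl hblt
    exact hb b (List.mem_filter.mpr ⟨hbl, by simpa using hblt⟩)
  have hSmin_some : ∀ sc, SminF p l = some sc → sc ∈ l ∧ p < sc ∧ ∀ b ∈ l, p < b → sc ≤ b := by
    intro sc hsc
    rw [SminF, List.min?_eq_some_iff] at hsc
    obtain ⟨hm, hb⟩ := hsc
    rw [List.mem_filter] at hm
    refine ⟨hm.1, by simpa using hm.2, ?_⟩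
    intro b hbl hblt
    exact hb b (List.mem_filter.mpr ⟨hbl, by simpa using hblt⟩)
  -- abbreviations
  set cp := splitSlash p with hcp
  set d : Int := (cp.length : Int) with hd
  have hd1 : 1 ≤ d := by rw [hd]; exact_mod_cast splitSlash_len p
  have hle : ∀ q, cpdB cp (splitSlash q) ≤ d := fun q => cpdB_le_len cp (splitSlash q)
  have hself : cpdB cp cp = d := cpdB_self cp
  have hdup_iff := two_le_count_iff s p k hk rfl
  have hpw : ∀ i j (_ : i < s.length) (_ : j < s.length), i < j → s[i] ≤ s[j] := by
    have h := hpair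
    rw [List.pairwise_iff_getElem] at h
    exact fun i j hi hj hij => h i j hi hj hij
  -- unfold both sides
  simp only [valA, BestF, hgd, ← hcp, ← hd]
  rw [hcnt]
  rcases Nat.eq_zero_or_pos k with hk0 | hk0
  · -- k = 0 : no predecessor, PmaxF is none
    have hPmax : PmaxF p l = none := by
      rw [PmaxF, List.max?_eq_none_iff, List.filter_eq_nil_iff]
      intro q hql
      simp only [decide_eq_true_eq]
      intro hqp
      exact absurd ((L1 q ((hmem q).mp hql) hqp).1) (by omega)
    rw [if_neg (by omega : ¬ 0 < k), hPmax]
    by_cases h1 : k + 1 < s.length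
    · have hq2 : s.getD (k + 1) "" = s[k + 1] := List.getD_eq_getElem _ _ h1
      have hq2ge : p ≤ s.getD (k + 1) "" := by rw [hq2]; exact hpw k (k + 1) hk h1 (by omega)
      rw [if_pos h1]
      by_cases heq2 : s.getD (k + 1) "" = p
      · -- duplicate to the right
        have hdup : 2 ≤ s.count p := by
          rw [hdup_iff]
          exact ⟨k + 1, h1, by omega, by rw [← hq2, heq2]⟩
        rw [if_pos hdup, heq2, hself]
        cases hsm : SminF p l with
        | none => have := hd1; all_goals ((try dsimp only); first | omega | (simp only [max_def]; split_ifs <;> omega))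
        | some sc =>
          have h3 := hle sc
          have := hd1
          all_goals ((try dsimp only); first | omega | (simp only [max_def]; split_ifs <;> omega))
      · -- strictly greater successor: it is the minimum above p
        have hgt2 : p < s.getD (k + 1) "" := lt_of_le_of_ne hq2ge (fun h => heq2 h.symm)
        have hnotdup : ¬ 2 ≤ s.count p := by
          rw [hdup_iff]
          rintro ⟨k', hk', hne, hpk⟩
          have hkk : k + 1 ≤ k' := by all_goals ((try dsimp only); first | omega | (simp only [max_def]; split_ifs <;> omega))
          have h4 : s.getD (k + 1) "" ≤ s[k'] := by
            rw [hq2]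
            rcases Nat.lt_or_ge (k+1) k' with h | h
            · exact hpw (k + 1) k' h1 hk' h
            · have : k' = k + 1 := by all_goals ((try dsimp only); first | omega | (simp only [max_def]; split_ifs <;> omega))
              subst this; exact le_refl _
          rw [hpk] at h4
          exact absurd hgt2 (not_lt.mpr h4)
        have hSmin : SminF p l = some (s.getD (k + 1) "") := by
          rw [SminF, List.min?_eq_some_iff]
          constructor
          · rw [List.mem_filter]
            refine ⟨(hmem _).mpr ?_, by simpa using hgt2⟩
            rw [hq2]; exact List.getElem_mem h1
          · intro b hb
            rw [List.mem_filter] at hb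
            exact (L2 b ((hmem b).mp hb.1) (by simpa using hb.2)).2
        rw [if_neg hnotdup, hSmin]
        all_goals ((try dsimp only); first | omega | (simp only [max_def]; split_ifs <;> omega))
    · -- singleton list
      have hSmin : SminF p l = none := by
        rw [SminF, List.min?_eq_none_iff, List.filter_eq_nil_iff]
        intro q hql
        simp only [decide_eq_true_eq]
        intro hqp
        exact absurd ((L2 q ((hmem q).mp hql) hqp).1) (by omega)
      have hnotdup : ¬ 2 ≤ s.count p := by
        rw [hdup_iff]
        rintro ⟨k', hk', hne, hpk⟩
        all_goals ((try dsimp only); first | omega | (simp only [max_def]; split_ifs <;> omega))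
      rw [if_neg h1, if_neg hnotdup, hSmin]
  · -- 0 < k
    have hq1 : s.getD (k - 1) "" = s[k - 1] := List.getD_eq_getElem _ _ (by omega)
    have hq1le : s.getD (k - 1) "" ≤ p := by rw [hq1]; exact hpw (k - 1) k (by omega) hk (by omega)
    rw [if_pos hk0]
    by_cases heq1 : s.getD (k - 1) "" = p
    · -- duplicate to the left: best is the full depth d on both sides
      have hdup : 2 ≤ s.count p := by
        rw [hdup_iff]
        exact ⟨k - 1, by omega, by omega, by rw [← hq1, heq1]⟩
      rw [if_pos hdup, heq1, hself]
      have hb1 : ∀ o : Option String,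
          (match o with
            | none => max 1 d
            | some pr => max (max 1 d) (cpdB cp (splitSlash pr))) = d := by
        intro o
        cases o with
        | none => have := hd1; all_goals ((try dsimp only); first | omega | (simp only [max_def]; split_ifs <;> omega))
        | some pr => have := hle pr; have := hd1; all_goals ((try dsimp only); first | omega | (simp only [max_def]; split_ifs <;> omega))
      cases hPm : PmaxF p l with
      | none =>
        by_cases h1 : k + 1 < s.length
        · rw [if_pos h1]
          cases hsm : SminF p l with
          | none => have := hle (s.getD (k+1) ""); have := hd1; all_goals ((try dsimp only); first | omega | (simp only [max_def]; split_ifs <;> omega))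
          | some sc => have := hle (s.getD (k+1) ""); have := hle sc; have := hd1; all_goals ((try dsimp only); first | omega | (simp only [max_def]; split_ifs <;> omega))
        · rw [if_neg h1]
          cases hsm : SminF p l with
          | none => have := hd1; all_goals ((try dsimp only); first | omega | (simp only [max_def]; split_ifs <;> omega))
          | some sc => have := hle sc; have := hd1; all_goals ((try dsimp only); first | omega | (simp only [max_def]; split_ifs <;> omega))
      | some pr =>
        by_cases h1 : k + 1 < s.length
        · rw [if_pos h1]
          cases hsm : SminF p l with
          | none => have := hle (s.getD (k+1) ""); have := hle pr; have := hd1; all_goals ((try dsimp only); first | omega | (simp only [max_def]; split_ifs <;> omega))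
          | some sc => have := hle (s.getD (k+1) ""); have := hle pr; have := hle sc; have := hd1; all_goals ((try dsimp only); first | omega | (simp only [max_def]; split_ifs <;> omega))
        · rw [if_neg h1]
          cases hsm : SminF p l with
          | none => have := hle pr; have := hd1; all_goals ((try dsimp only); first | omega | (simp only [max_def]; split_ifs <;> omega))
          | some sc => have := hle pr; have := hle sc; have := hd1; all_goals ((try dsimp only); first | omega | (simp only [max_def]; split_ifs <;> omega))
    · -- strictly smaller predecessor: it is the maximum below p
      have hlt1 : s.getD (k - 1) "" < p := lt_of_le_of_ne hq1le heq1
      have hPmax : PmaxF p l = some (s.getD (k - 1) "") := by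
        rw [PmaxF, List.max?_eq_some_iff]
        constructor
        · rw [List.mem_filter]
          refine ⟨(hmem _).mpr ?_, by simpa using hlt1⟩
          rw [hq1]; exact List.getElem_mem (by omega)
        · intro b hb
          rw [List.mem_filter] at hb
          exact (L1 b ((hmem b).mp hb.1) (by simpa using hb.2)).2
      rw [hPmax]
      have hocc_below : ∀ (k' : Nat) (_ : k' < k) (hk' : k' < s.length), s[k'] = p → False := by
        intro k' hkk hk' hpk
        have h4 : s[k'] ≤ s.getD (k - 1) "" := by
          rw [hq1]
          rcases Nat.lt_or_ge k' (k - 1) with h | h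
          · exact hpw k' (k - 1) hk' (by omega) h
          · have : k' = k - 1 := by all_goals ((try dsimp only); first | omega | (simp only [max_def]; split_ifs <;> omega))
            subst this; exact le_refl _
        rw [hpk] at h4
        exact absurd hlt1 (not_lt.mpr h4)
      by_cases h1 : k + 1 < s.length
      · have hq2 : s.getD (k + 1) "" = s[k + 1] := List.getD_eq_getElem _ _ h1
        have hq2ge : p ≤ s.getD (k + 1) "" := by rw [hq2]; exact hpw k (k + 1) hk h1 (by omega)
        rw [if_pos h1]
        by_cases heq2 : s.getD (k + 1) "" = p
        · have hdup : 2 ≤ s.count p := by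
            rw [hdup_iff]
            exact ⟨k + 1, h1, by omega, by rw [← hq2, heq2]⟩
          rw [if_pos hdup, heq2, hself]
          have h5 := hle (s.getD (k - 1) "")
          cases hsm : SminF p l with
          | none => have := hd1; all_goals ((try dsimp only); first | omega | (simp only [max_def]; split_ifs <;> omega))
          | some sc => have := hle sc; have := hd1; all_goals ((try dsimp only); first | omega | (simp only [max_def]; split_ifs <;> omega))
        · have hgt2 : p < s.getD (k + 1) "" := lt_of_le_of_ne hq2ge (fun h => heq2 h.symm)
          have hnotdup : ¬ 2 ≤ s.count p := by
            rw [hdup_iff]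
            rintro ⟨k', hk', hne, hpk⟩
            rcases Nat.lt_or_ge k' k with h | h
            · exact hocc_below k' h hk' hpk
            · have hkk : k + 1 ≤ k' := by all_goals ((try dsimp only); first | omega | (simp only [max_def]; split_ifs <;> omega))
              have h4 : s.getD (k + 1) "" ≤ s[k'] := by
                rw [hq2]
                rcases Nat.lt_or_ge (k+1) k' with h' | h'
                · exact hpw (k + 1) k' h1 hk' h'
                · have : k' = k + 1 := by all_goals ((try dsimp only); first | omega | (simp only [max_def]; split_ifs <;> omega))
                  subst this; exact le_refl _
              rw [hpk] at h4
              exact absurd hgt2 (not_lt.mpr h4)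
          have hSmin : SminF p l = some (s.getD (k + 1) "") := by
            rw [SminF, List.min?_eq_some_iff]
            constructor
            · rw [List.mem_filter]
              refine ⟨(hmem _).mpr ?_, by simpa using hgt2⟩
              rw [hq2]; exact List.getElem_mem h1
            · intro b hb
              rw [List.mem_filter] at hb
              exact (L2 b ((hmem b).mp hb.1) (by simpa using hb.2)).2
          rw [if_neg hnotdup, hSmin]
      · have hSmin : SminF p l = none := by
          rw [SminF, List.min?_eq_none_iff, List.filter_eq_nil_iff]
          intro q hql
          simp only [decide_eq_true_eq]
          intro hqp
          exact absurd ((L2 q ((hmem q).mp hql) hqp).1) (by omega)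
        have hnotdup : ¬ 2 ≤ s.count p := by
          rw [hdup_iff]
          rintro ⟨k', hk', hne, hpk⟩
          rcases Nat.lt_or_ge k' k with h | h
          · exact hocc_below k' h hk' hpk
          · all_goals ((try dsimp only); first | omega | (simp only [max_def]; split_ifs <;> omega))
        rw [if_neg h1, if_neg hnotdup, hSmin]

theorem sortedBestA_body (l : List String) (d : PySem.Dict String Int) (ip : Int × String)
    (hip : ip ∈ PySem.List.enumerate (PySem.List.sorted l (fun x => x) false) 0) :
    (let i := ip.1
     let p := ip.2
     let best : Int := 1
     let best := if 0 < i then max best (common_prefix_depth p (PySem.List.pyGetD (PySem.List.sorted l (fun x => x) false) (i - 1) "")) else best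
     let best := if i < ((PySem.List.sorted l (fun x => x) false).length : Int) - 1 then max best (common_prefix_depth p (PySem.List.pyGetD (PySem.List.sorted l (fun x => x) false) (i + 1) "")) else best
     d.insert p best) = d.insert ip.2 (BestF l ip.2) := by
  set s := PySem.List.sorted l (fun x => x) false with hs
  rw [PySem.List.mem_enumerate_iff] at hip
  obtain ⟨k, hk, rfl⟩ := hip
  simp only [zero_add]
  have hval := valA_eq_BestF l k hk
  rw [valA] at hval
  rw [List.getD_eq_getElem _ _ hk] at hval
  refine congrArg (d.insert s[k]) ?_
  rw [← hval]
  have c1 : ((0:Int) < (k:Int)) = (0 < k) := by simp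
  have c2 : ((k:Int) < (s.length : Int) - 1) = (k + 1 < s.length) := by
    apply propext; omega
  simp only [c1, c2, cpd_eq]
  by_cases hk0 : 0 < k
  · have e1 : ((k:Int) - 1) = ((k - 1 : Nat) : Int) := by omega
    rw [if_pos hk0, if_pos hk0, e1, PySem.List.pyGetD_natCast]
    by_cases hk1 : k + 1 < s.length
    · have e2 : ((k:Int) + 1) = ((k + 1 : Nat) : Int) := by omega
      rw [if_pos hk1, if_pos hk1, e2, PySem.List.pyGetD_natCast]
    · rw [if_neg hk1, if_neg hk1]
  · rw [if_neg hk0, if_neg hk0]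
    by_cases hk1 : k + 1 < s.length
    · have e2 : ((k:Int) + 1) = ((k + 1 : Nat) : Int) := by omega
      rw [if_pos hk1, if_pos hk1, e2, PySem.List.pyGetD_natCast]
    · rw [if_neg hk1, if_neg hk1]

theorem sortedBestA_get? (l : List String) (q : String) :
    (sortedBestA (PySem.List.sorted l (fun x => x) false)).get? q =
      if q ∈ PySem.List.sorted l (fun x => x) false then some (BestF l q) else none := by
  rw [sortedBestA]
  rw [PySem.List.foldl_congr_mem _ _ (fun d ip => d.insert ip.2 (BestF l ip.2)) _
    (fun d ip hip => sortedBestA_body l d ip hip)]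
  have hm2 := @List.foldl_map (Int × String) String (PySem.Dict String Int)
    (fun ip : Int × String => ip.2)
    (fun d x => d.insert x (BestF l x))
    (PySem.List.enumerate (PySem.List.sorted l (fun x => x) false) 0) PySem.Dict.empty
  rw [PySem.List.map_snd_enumerate] at hm2
  rw [← hm2, get?_foldl_insert_key]
  simp [PySem.Dict.get?_empty]

theorem sortedBestA_eq (l : List String) :
    sortedBestA (PySem.List.sorted l (fun x => x) false) =
      (PySem.List.sorted l (fun x => x) false).foldl
        (fun d x => d.insert x (BestF l x)) PySem.Dict.empty := by
  rw [sortedBestA]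
  rw [PySem.List.foldl_congr_mem _ _ (fun d ip => d.insert ip.2 (BestF l ip.2)) _
    (fun d ip hip => sortedBestA_body l d ip hip)]
  have hm2 := @List.foldl_map (Int × String) String (PySem.Dict String Int)
    (fun ip : Int × String => ip.2)
    (fun d x => d.insert x (BestF l x))
    (PySem.List.enumerate (PySem.List.sorted l (fun x => x) false) 0) PySem.Dict.empty
  rw [PySem.List.map_snd_enumerate] at hm2
  exact hm2.symm

theorem ancA_get? (l : List String) (p : String) (hp : p ∈ l) :
    (pathToAncestorA (sortedBestA (PySem.List.sorted l (fun x => x) false))).get? p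
      = some (AncF l p) := by
  set s := PySem.List.sorted l (fun x => x) false with hs
  set sb := sortedBestA s with hsb
  have hnod : sb.keys.Nodup := by
    rw [hsb, sortedBestA_eq]
    exact PySem.Dict.nodup_keys_foldl_insert s (fun d x => BestF l x) PySem.Dict.empty
      (by rw [PySem.Dict.keys_empty]; exact List.nodup_nil)
  have hitem : ∀ pb ∈ sb.items, pb.2 = BestF l pb.1 := by
    intro pb hpb
    have hg : sb.get? pb.1 = some pb.2 := by
      have := PySem.Dict.get?_of_mem_items (d := sb) (k := pb.1) (v := pb.2) (by simpa using hpb) hnod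
      exact this
    rw [hsb, sortedBestA_get?] at hg
    by_cases hq : pb.1 ∈ s
    · rw [if_pos hq] at hg
      exact (Option.some.injEq _ _ ▸ hg :).symm
    · rw [if_neg hq] at hg
      cases hg
  rw [pathToAncestorA]
  rw [PySem.List.foldl_congr_mem _ _ (fun d pb => d.insert pb.1 (AncF l pb.1)) _ ?hcongr]
  case hcongr =>
    intro d pb hpb
    rw [hitem pb hpb]
    rfl
  have hm2 := @List.foldl_map (String × Int) String (PySem.Dict String String)
    (fun pb : String × Int => pb.1)
    (fun d x => d.insert x (AncF l x))
    sb.items PySem.Dict.empty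
  rw [← hm2, get?_foldl_insert_key]
  have hpk : p ∈ sb.items.map (fun pb => pb.1) := by
    have hps : p ∈ s := by rw [hs, PySem.List.mem_sorted]; exact hp
    have hg : sb.get? p = some (BestF l p) := by
      rw [hsb, sortedBestA_get?, if_pos hps]
    have : p ∈ sb.keys := by
      by_contra hc
      rw [← PySem.Dict.get?_eq_none_iff_not_mem_keys] at hc
      rw [hc] at hg
      cases hg
    simpa [PySem.Dict.keys] using this
  rw [if_pos hpk]

theorem ancB_body (l : List String) (d : PySem.Dict String String) (ip : Int × String)
    (hip : ip ∈ PySem.List.enumerate l 0) :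
    (let i := ip.1
     let p := ip.2
     if d.contains p then d else
     let comps := splitSlash p
     let scan := (PySem.List.enumerate l 0).foldl (scanStep i p) (none, none, false)
     let best : Int := if scan.2.2 then (comps.length : Int) else 1
     let best := match scan.1 with
       | none => best
       | some pr => max best (cpdB comps (splitSlash pr))
     let best := match scan.2.1 with
       | none => best
       | some sc => max best (cpdB comps (splitSlash sc))
     d.insert p (if 2 ≤ best then PySem.Str.join "/" (PySem.List.slice comps none (some best)) else p)) =
    (if d.contains ip.2 then d else d.insert ip.2 (AncF l ip.2)) := by
  rw [PySem.List.mem_enumerate_iff] at hip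
  obtain ⟨k, hk, rfl⟩ := hip
  simp only [zero_add]
  rw [scan_enumerate l l[k] k hk rfl]
  simp only [AncF, BestF, decide_eq_true_eq]

theorem ancB_get? (l : List String) (p : String) (hp : p ∈ l) :
    (ancB l).get? p = some (AncF l p) := by
  rw [ancB]
  rw [PySem.List.foldl_congr_mem _ _
    (fun d ip => if d.contains ip.2 then d else d.insert ip.2 (AncF l ip.2)) _
    (fun d ip hip => ancB_body l d ip hip)]
  have hm : (PySem.List.enumerate l 0).foldl
      (fun d ip => if d.contains ip.2 then d else d.insert ip.2 (AncF l ip.2)) PySem.Dict.empty =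
      l.foldl (fun d x => if d.contains x then d else d.insert x (AncF l x)) PySem.Dict.empty := by
    have hm2 := @List.foldl_map (Int × String) String (PySem.Dict String String)
      (fun ip : Int × String => ip.2)
      (fun d x => if d.contains x then d else d.insert x (AncF l x))
      (PySem.List.enumerate l 0) PySem.Dict.empty
    rw [PySem.List.map_snd_enumerate] at hm2
    exact hm2.symm
  rw [hm, get?_foldl_insert_absent]
  simp [PySem.Dict.get?_empty, hp]

theorem main_equiv (norm_paths : List String) :
    group_by_ancestor_py norm_paths = group_by_ancestor_py_alt norm_paths := by
  rw [group_by_ancestor_py, group_by_ancestor_py_alt, groupsA, groupsB]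
  refine congrArg PySem.Dict.items (PySem.List.foldl_congr_mem _ _ _ _ ?_)
  intro acc p hp
  simp only [ancA_get? norm_paths p hp, ancB_get? norm_paths p hp]

-- ===== VERDICT (by name: the statement is the Claim_ definition above) =====
theorem group_by_ancestor_py_spec : Claim_equal_group_by_ancestor_py := by
  intro l _
  unfold Spec_group_by_ancestor_py
  exact main_equiv l
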